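-- pv_equiv track=rewrite | github.com/aimasteracc/tree-sitter-analyzer | tests/compatibility_test/mcp_test_direct.py | filter_test_cases
-- ===== SOURCE A (Python) =====
-- from typing import Any, Dict, List, Optional, Set
--
-- def filter_test_cases(test_cases: List[Dict[str, Any]],
--                      tools: Optional[Set[str]] = None,
--                      test_ids: Optional[Set[str]] = None,
--                      categories: Optional[Set[str]] = None) -> List[Dict[str, Any]]:
--     """テストケースをフィルタリング"""
--     filtered = test_cases
--
--     if tools:
--         filtered = [tc for tc in filtered if tc.get("tool") in tools]
--
--     if test_ids:
--         filtered = [tc for tc in filtered if tc.get("id") in test_ids]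
--
--     if categories:
--         filtered = [tc for tc in filtered if tc.get("category") in categories]
--
--     return filtered
-- ===== SOURCE B (Python) =====
-- from typing import Any, Dict, List, Optional, Set
--
-- def filter_test_cases(test_cases: List[Dict[str, Any]],
--                      tools: Optional[Set[str]] = None,
--                      test_ids: Optional[Set[str]] = None,
--                      categories: Optional[Set[str]] = None) -> List[Dict[str, Any]]:
--     """Data-driven: build the list of active (key, allowed-set) constraints once,
--     then one accumulator loop keeps a case iff it satisfies every constraint."""
--     active = [(k, s) for k, s in (("tool", tools), ("id", test_ids), ("category", categories)) if s]
--     out = []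
--     for tc in test_cases:
--         if all(tc.get(k) in s for k, s in active):
--             out.append(tc)
--     return out
-- ===== Notes on version B (the rewrite author's own statement) =====
-- stated objective: simpler
-- what changed: Replaces A's three hardcoded sequential filter passes with a data-driven design: the active (key, allowed-set) constraints are computed once as data, and a single accumulator loop keeps a case iff it satisfies all active constraints.
import Mathlib
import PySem

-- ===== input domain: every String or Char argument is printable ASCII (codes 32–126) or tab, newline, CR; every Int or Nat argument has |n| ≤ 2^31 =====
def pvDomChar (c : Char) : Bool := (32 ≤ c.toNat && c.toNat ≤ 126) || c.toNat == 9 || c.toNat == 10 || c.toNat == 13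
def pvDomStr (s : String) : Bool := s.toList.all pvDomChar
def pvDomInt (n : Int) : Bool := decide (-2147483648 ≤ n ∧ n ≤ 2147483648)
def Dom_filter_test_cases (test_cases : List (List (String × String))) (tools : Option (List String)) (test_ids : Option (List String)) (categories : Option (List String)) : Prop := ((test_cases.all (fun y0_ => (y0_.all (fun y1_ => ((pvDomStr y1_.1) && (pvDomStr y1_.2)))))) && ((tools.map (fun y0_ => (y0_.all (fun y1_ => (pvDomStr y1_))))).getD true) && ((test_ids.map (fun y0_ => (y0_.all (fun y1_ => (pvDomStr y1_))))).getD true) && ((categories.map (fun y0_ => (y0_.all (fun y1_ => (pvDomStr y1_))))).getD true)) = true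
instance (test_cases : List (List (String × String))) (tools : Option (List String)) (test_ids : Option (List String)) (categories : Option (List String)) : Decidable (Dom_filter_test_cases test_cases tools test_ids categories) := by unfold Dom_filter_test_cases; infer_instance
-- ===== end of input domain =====

-- ===== PORT A =====
-- B changes: the three hardcoded filter passes become a data-driven constraint list checked in one
-- accumulator loop (objective: simpler / one pass). Equivalence is about the returned list's value.
-- `tc.get(k) in s`: first-match lookup in the association list; None is never in a set of strings.
def pvGetMem (tc : List (String × String)) (k : String) (s : List String) : Bool :=
  match tc.lookup k with
  | none => false
  | some v => s.contains v

def filter_test_cases (test_cases : List (List (String × String))) (tools : Option (List String)) (test_ids : Option (List String)) (categories : Option (List String)) : List (List (String × String)) :=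
  let filtered := test_cases
  -- `if tools:` — truthy iff not None and non-empty
  let filtered := match tools with
    | none => filtered
    | some s => if s.isEmpty then filtered else filtered.filter (fun tc => pvGetMem tc "tool" s)
  let filtered := match test_ids with
    | none => filtered
    | some s => if s.isEmpty then filtered else filtered.filter (fun tc => pvGetMem tc "id" s)
  let filtered := match categories with
    | none => filtered
    | some s => if s.isEmpty then filtered else filtered.filter (fun tc => pvGetMem tc "category" s)
  filtered

-- ===== PORT B =====
-- `active = [(k, s) for k, s in (...) if s]` — keep only truthy (non-None, non-empty) filters
def pvActive (tools test_ids categories : Option (List String)) : List (String × List String) :=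
  (("tool", tools) :: ("id", test_ids) :: ("category", categories) :: []).foldr
    (fun p acc => match p.2 with
      | none => acc
      | some s => if s.isEmpty then acc else (p.1, s) :: acc) []

def filter_test_cases_alt (test_cases : List (List (String × String))) (tools : Option (List String)) (test_ids : Option (List String)) (categories : Option (List String)) : List (List (String × String)) :=
  let active := pvActive tools test_ids categories
  -- `out = []; for tc in test_cases: if all(...): out.append(tc)`
  test_cases.foldl
    (fun out tc => if active.all (fun p => pvGetMem tc p.1 p.2) then out ++ [tc] else out) []

-- ===== PRECONDITION & SPEC =====
def Spec_filter_test_cases (test_cases : List (List (String × String))) (tools : Option (List String)) (test_ids : Option (List String)) (categories : Option (List String)) (out : List (List (String × String))) : Prop := out = filter_test_cases_alt test_cases tools test_ids categories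
instance (test_cases : List (List (String × String))) (tools : Option (List String)) (test_ids : Option (List String)) (categories : Option (List String)) (out : List (List (String × String))) : Decidable (Spec_filter_test_cases test_cases tools test_ids categories out) := by unfold Spec_filter_test_cases; infer_instance

-- ===== CLAIM (what is proved, stated in full; the proofs are below) =====
def Claim_equal_filter_test_cases : Prop := ∀ (test_cases : List (List (String × String))) (tools : Option (List String)) (test_ids : Option (List String)) (categories : Option (List String)), Dom_filter_test_cases test_cases tools test_ids categories → Spec_filter_test_cases test_cases tools test_ids categories (filter_test_cases test_cases tools test_ids categories)

-- ===== LEMMAS AND PROOFS =====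
theorem pv_isEmpty_false {α : Type} {l : List α} (h : ¬ l = []) : l.isEmpty = false := by
  simp [h]

def pvCheck (o : Option (List String)) (k : String) (tc : List (String × String)) : Bool :=
  match o with
  | none => true
  | some s => s.isEmpty || pvGetMem tc k s

theorem pv_stepA (o : Option (List String)) (k : String) (l : List (List (String × String))) :
    (match o with
      | none => l
      | some s => if s.isEmpty then l else l.filter (fun tc => pvGetMem tc k s))
    = l.filter (fun tc => pvCheck o k tc) := by
  cases o with
  | none => simp [pvCheck]
  | some s =>
    by_cases h : s.isEmpty <;> simp [pvCheck, h]

theorem pv_activeAll (tools ids cats : Option (List String)) (tc : List (String × String)) :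
    (pvActive tools ids cats).all (fun p => pvGetMem tc p.1 p.2)
    = (pvCheck tools "tool" tc && (pvCheck ids "id" tc && pvCheck cats "category" tc)) := by
  cases tools <;> cases ids <;> cases cats <;>
    simp only [pvActive, List.foldr, pvCheck] <;>
    (try split_ifs) <;> simp_all [pv_isEmpty_false]

-- ===== VERDICT (by name: the statement is the Claim_ definition above) =====
theorem filter_test_cases_spec : Claim_equal_filter_test_cases := by
  intro tcs tools ids cats _
  unfold Spec_filter_test_cases filter_test_cases filter_test_cases_alt
  rw [PySem.List.foldl_append_if_eq_filter, List.nil_append]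
  simp only [pv_stepA]
  simp only [List.filter_filter]
  apply List.filter_congr
  intro tc _
  rw [pv_activeAll]
  cases pvCheck tools "tool" tc <;> cases pvCheck ids "id" tc <;>
    cases pvCheck cats "category" tc <;> rfl
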